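-- pv_equiv track=rewrite | github.com/TDT4290-Group-1/Knitalytics | backend/utils/instagram_processer.py | _sort_popular_hashtags
-- ===== SOURCE A (Python) =====
-- from typing import List
--
-- def _sort_popular_hashtags(hashtags: List[str]) -> List[str]:
--     """
--     hashtags: a list of hashtags
--     returns: a list of hashtags sorted after frequency of usage
--     """
--     popular_hashtags_count = {}
--     popular_hashtags = []
--     for hashtag in hashtags:
--         if hashtag not in popular_hashtags:
--             popular_hashtags.append(hashtag)
--             popular_hashtags_count[hashtag] = 1
--         else:
--             popular_hashtags_count[hashtag] += 1
--     sorted_hashtags = sorted(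
--         popular_hashtags_count, key=popular_hashtags_count.get, reverse=True
--     )
--     return sorted_hashtags
-- ===== SOURCE B (Python) =====
-- def _sort_popular_hashtags(hashtags):
--     """
--     hashtags: a list of hashtags
--     returns: a list of hashtags sorted after frequency of usage
--     """
--     counts = {}
--     for hashtag in hashtags:
--         counts[hashtag] = counts.get(hashtag, 0) + 1
--     buckets = {}
--     for hashtag, count in counts.items():
--         buckets.setdefault(count, []).append(hashtag)
--     result = []
--     for count in sorted(buckets, reverse=True):
--         result.extend(buckets[count])
--     return result
-- ===== Notes on version B (the rewrite author's own statement) =====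
-- stated objective: faster
-- what changed: Replaces A's per-element linear membership scan plus comparison sort with a single counting pass into a dict, distribution of distinct hashtags into count-keyed buckets, and concatenation of buckets in descending count order.
import Mathlib
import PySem

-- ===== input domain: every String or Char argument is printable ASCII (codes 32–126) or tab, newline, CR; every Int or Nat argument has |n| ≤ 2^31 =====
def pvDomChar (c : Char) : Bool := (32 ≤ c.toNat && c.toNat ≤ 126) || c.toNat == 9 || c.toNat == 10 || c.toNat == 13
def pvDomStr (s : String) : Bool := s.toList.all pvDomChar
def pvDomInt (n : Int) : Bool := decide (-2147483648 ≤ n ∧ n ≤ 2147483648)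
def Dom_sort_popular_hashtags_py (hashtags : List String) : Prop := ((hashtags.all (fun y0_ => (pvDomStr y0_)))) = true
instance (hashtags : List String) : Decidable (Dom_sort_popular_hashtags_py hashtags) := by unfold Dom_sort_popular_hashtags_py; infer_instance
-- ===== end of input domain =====

-- B replaces A's per-element linear membership scan + comparison sort by a counting pass,
-- count-keyed buckets, and concatenation of the buckets in descending count order (objective: faster).

-- ===== PORT A =====
-- A's loop state: (popular_hashtags_count, popular_hashtags).
-- 'popular_hashtags_count[hashtag] += 1' is ported as modify with default 0; the default is never
-- used because that branch runs only when the key is already present.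
-- 'sorted(popular_hashtags_count, key=popular_hashtags_count.get, reverse=True)' iterates the dict's
-- keys; key = .get returns the stored count (never None: every key is in the dict), ported as getD 0.
def sort_popular_hashtags_py (hashtags : List String) : List String :=
  let st := hashtags.foldl
    (fun (st : PySem.Dict String Int × List String) hashtag =>
      if hashtag ∉ st.2 then
        (st.1.insert hashtag 1, st.2 ++ [hashtag])
      else
        (st.1.modify hashtag 0 (· + 1), st.2))
    (PySem.Dict.empty, [])
  PySem.List.sorted st.1.keys (fun k => st.1.getD k 0) true

-- ===== PORT B =====
-- counts.get(hashtag, 0) + 1 stored back; buckets.setdefault(count, []).append(hashtag) is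
-- modify with default []; buckets[count] in the last loop is ported as getD [] — the default is
-- never used since the loop iterates exactly the bucket keys.
def sort_popular_hashtags_py_alt (hashtags : List String) : List String :=
  let counts := hashtags.foldl
    (fun (d : PySem.Dict String Int) hashtag => d.insert hashtag (d.getD hashtag 0 + 1))
    PySem.Dict.empty
  let buckets := counts.items.foldl
    (fun (d : PySem.Dict Int (List String)) p => d.modify p.2 [] (· ++ [p.1]))
    PySem.Dict.empty
  (PySem.List.sorted buckets.keys (fun c => c) true).foldl
    (fun acc c => acc ++ buckets.getD c []) []

-- ===== PRECONDITION & SPEC =====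
def Spec_sort_popular_hashtags_py (hashtags : List String) (out : List String) : Prop := out = sort_popular_hashtags_py_alt hashtags
instance (hashtags : List String) (out : List String) : Decidable (Spec_sort_popular_hashtags_py hashtags out) := by unfold Spec_sort_popular_hashtags_py; infer_instance

-- ===== CLAIM (what is proved, stated in full; the proofs are below) =====
def Claim_equal_sort_popular_hashtags_py : Prop := ∀ (hashtags : List String), Dom_sort_popular_hashtags_py hashtags → Spec_sort_popular_hashtags_py hashtags (sort_popular_hashtags_py hashtags)

-- ===== LEMMAS AND PROOFS =====

-- Invariant of A's counting loop: keys of the dict stay equal to popular_hashtags,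
-- popular_hashtags accumulates the set-update, and stored values count occurrences.
lemma aLoop_inv (l : List String) : ∀ (d : PySem.Dict String Int) (pops : List String),
    d.keys = pops →
    (l.foldl
      (fun (st : PySem.Dict String Int × List String) hashtag =>
        if hashtag ∉ st.2 then
          (st.1.insert hashtag 1, st.2 ++ [hashtag])
        else
          (st.1.modify hashtag 0 (· + 1), st.2))
      (d, pops)).1.keys =
      (l.foldl
      (fun (st : PySem.Dict String Int × List String) hashtag =>
        if hashtag ∉ st.2 then
          (st.1.insert hashtag 1, st.2 ++ [hashtag])
        else
          (st.1.modify hashtag 0 (· + 1), st.2))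
      (d, pops)).2 ∧
    (l.foldl
      (fun (st : PySem.Dict String Int × List String) hashtag =>
        if hashtag ∉ st.2 then
          (st.1.insert hashtag 1, st.2 ++ [hashtag])
        else
          (st.1.modify hashtag 0 (· + 1), st.2))
      (d, pops)).2 = PySem.Set.update pops l ∧
    ∀ k, (l.foldl
      (fun (st : PySem.Dict String Int × List String) hashtag =>
        if hashtag ∉ st.2 then
          (st.1.insert hashtag 1, st.2 ++ [hashtag])
        else
          (st.1.modify hashtag 0 (· + 1), st.2))
      (d, pops)).1.getD k 0 = d.getD k 0 + l.count k := by
  induction l with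
  | nil => intro d pops hk; simp [PySem.Set.update, hk]
  | cons h t ih =>
    intro d pops hk
    by_cases hm : h ∈ pops
    · have hstep : (if h ∉ pops then (d.insert h 1, pops ++ [h]) else (d.modify h 0 (· + 1), pops))
        = (d.modify h 0 (· + 1), pops) := by simp [hm]
      simp only [List.foldl_cons, hstep]
      have hk' : (d.modify h 0 (· + 1)).keys = pops := by
        rw [PySem.Dict.keys_modify, PySem.Dict.keys_insert_of_contains]
        · exact hk
        · rw [PySem.Dict.contains_eq_decide_mem_keys, hk]; simp [hm]
      obtain ⟨h1, h2, h3⟩ := ih (d.modify h 0 (· + 1)) pops hk'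
      refine ⟨h1, ?_, ?_⟩
      · rw [h2, PySem.Set.update_cons, PySem.Set.add_of_mem hm]
      · intro k
        rw [h3 k, PySem.Dict.getD_modify]
        by_cases hkh : k = h
        · subst hkh; simp; omega
        · simp [hkh, Ne.symm hkh]
    · have hstep : (if h ∉ pops then (d.insert h 1, pops ++ [h]) else (d.modify h 0 (· + 1), pops))
        = (d.insert h 1, pops ++ [h]) := by simp [hm]
      simp only [List.foldl_cons, hstep]
      have hnc : d.contains h = false := by
        rw [PySem.Dict.contains_eq_decide_mem_keys, hk]; simp [hm]
      have hk' : (d.insert h 1).keys = pops ++ [h] := by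
        rw [PySem.Dict.keys_insert_of_not_contains d 1 hnc, hk]
      obtain ⟨h1, h2, h3⟩ := ih (d.insert h 1) (pops ++ [h]) hk'
      refine ⟨h1, ?_, ?_⟩
      · rw [h2, PySem.Set.update_cons, PySem.Set.add_of_not_mem hm]
      · intro k
        rw [h3 k, PySem.Dict.getD_insert]
        by_cases hkh : k = h
        · subst hkh
          rw [PySem.Dict.getD_of_not_contains d 0 hnc]
          simp only [List.count_cons_self]
          push_cast
          omega
        · simp [hkh, Ne.symm hkh]

-- Inserting x into a key-descending list: the v-filter gains x at the END iff key x = v.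
lemma filter_insertBy (key : α → Int) (v : Int) (x : α) :
    ∀ (ys : List α), ys.Pairwise (fun a b => key b ≤ key a) →
    (PySem.List.insertBy (fun a b => decide (key b < key a)) x ys).filter (fun z => key z == v)
      = if key x == v then ys.filter (fun z => key z == v) ++ [x]
        else ys.filter (fun z => key z == v) := by
  intro ys
  induction ys with
  | nil =>
    intro _
    by_cases hv : key x = v <;> simp [PySem.List.insertBy, hv]
  | cons y t ih =>
    intro hp
    by_cases hlt : key y < key x
    · have hins : PySem.List.insertBy (fun a b => decide (key b < key a)) x (y :: t)
          = x :: y :: t := by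
        simp [PySem.List.insertBy, hlt]
      rw [hins]
      by_cases hv : key x = v
      · have hnil : (y :: t).filter (fun z => key z == v) = [] := by
          rw [List.filter_eq_nil_iff]
          intro z hz
          have hzy : key z ≤ key y := by
            rcases List.mem_cons.mp hz with rfl | hz'
            · exact le_refl _
            · exact (List.pairwise_cons.mp hp).1 z hz'
          simp only [beq_iff_eq]
          omega
        rw [List.filter_cons_of_pos (by simp [hv]), hnil]
        simp [hv]
      · rw [List.filter_cons_of_neg (by simp [hv])]
        simp [hv]
    · have hins : PySem.List.insertBy (fun a b => decide (key b < key a)) x (y :: t)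
          = y :: PySem.List.insertBy (fun a b => decide (key b < key a)) x t := by
        simp [PySem.List.insertBy, hlt]
      rw [hins, List.filter_cons, ih (List.pairwise_cons.mp hp).2, List.filter_cons]
      by_cases hv : key x = v <;> by_cases hyv : key y = v <;> simp [hv, hyv]

-- Stability of Python's reverse sort: filtering at any key value gives the original sublist.
lemma filter_sorted_rev (key : α → Int) (v : Int) (xs : List α) :
    (PySem.List.sorted xs key true).filter (fun z => key z == v)
      = xs.filter (fun z => key z == v) := by
  induction xs using List.reverseRecOn with
  | nil => simp [PySem.List.sorted_rev_eq_foldl_insertBy]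
  | append_singleton xs x ih =>
    have hfold : PySem.List.sorted (xs ++ [x]) key true
        = PySem.List.insertBy (fun a b => decide (key b < key a)) x
            (PySem.List.sorted xs key true) := by
      rw [PySem.List.sorted_rev_eq_foldl_insertBy, PySem.List.sorted_rev_eq_foldl_insertBy,
        List.foldl_append]
      simp
    rw [hfold, filter_insertBy key v x _ (PySem.List.sorted_pairwise_rev xs key)]
    rw [List.filter_append, ih]
    by_cases hv : key x = v <;> simp [hv]

-- Two key-descending lists with the same filter at every key value are equal.
lemma eq_of_pairwise_ge_of_filter_eq (key : α → Int) :
    ∀ (l₁ l₂ : List α), l₁.Pairwise (fun a b => key b ≤ key a) →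
    l₂.Pairwise (fun a b => key b ≤ key a) →
    (∀ v : Int, l₁.filter (fun x => key x == v) = l₂.filter (fun x => key x == v)) →
    l₁ = l₂ := by
  intro l₁
  induction l₁ with
  | nil =>
    intro l₂ _ _ hf
    cases l₂ with
    | nil => rfl
    | cons b t₂ =>
      have h := hf (key b)
      rw [List.filter_nil, List.filter_cons, if_pos (by simp)] at h
      exact absurd h (by simp)
  | cons a t₁ ih =>
    intro l₂ hp₁ hp₂ hf
    cases l₂ with
    | nil =>
      have h := hf (key a)
      rw [List.filter_nil, List.filter_cons, if_pos (by simp)] at h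
      exact absurd h (by simp)
    | cons b t₂ =>
      have hab : key a = key b := by
        by_contra hne
        have h₁ := hf (key a)
        rw [List.filter_cons, List.filter_cons, if_pos (by simp),
          if_neg (by simp only [beq_iff_eq]; exact fun h => hne h.symm)] at h₁
        have hmem : a ∈ t₂.filter (fun x => key x == key a) := by rw [← h₁]; simp
        have hle₁ : key a ≤ key b := (List.pairwise_cons.mp hp₂).1 a (List.mem_filter.mp hmem).1
        have h₂ := hf (key b)
        rw [List.filter_cons, List.filter_cons, if_neg (by simp only [beq_iff_eq]; exact hne),
          if_pos (by simp)] at h₂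
        have hmem' : b ∈ t₁.filter (fun x => key x == key b) := by rw [h₂]; simp
        have hle₂ : key b ≤ key a := (List.pairwise_cons.mp hp₁).1 b (List.mem_filter.mp hmem').1
        omega
      have h := hf (key a)
      rw [List.filter_cons, List.filter_cons, if_pos (by simp),
        if_pos (by simp only [beq_iff_eq]; exact hab.symm)] at h
      have hhead : a = b := (List.cons.injEq _ _ _ _ ▸ h).1
      subst hhead
      have htails : ∀ v : Int, t₁.filter (fun x => key x == v) = t₂.filter (fun x => key x == v) := by
        intro v
        have hv := hf v
        rw [List.filter_cons, List.filter_cons] at hv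
        by_cases hc : (key a == v) = true
        · rw [if_pos hc, if_pos hc] at hv
          exact (List.cons.injEq _ _ _ _ ▸ hv).2
        · rwa [if_neg hc, if_neg hc] at hv
      exact congrArg (a :: ·) (ih t₂ (List.pairwise_cons.mp hp₁).2 (List.pairwise_cons.mp hp₂).2 htails)

-- Filtering the bucket concatenation at v gives D's v-filter (buckets are disjoint; keys nodup).
lemma filter_flatMap_buckets (D : List String) (cnt : String → Int) (v : Int) :
    ∀ (ds : List Int), ds.Nodup →
    (ds.flatMap (fun c => D.filter (fun k => cnt k == c))).filter (fun k => cnt k == v)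
      = if v ∈ ds then D.filter (fun k => cnt k == v) else [] := by
  intro ds
  induction ds with
  | nil => simp
  | cons c t ih =>
    intro hnd
    have hnd' := List.nodup_cons.mp hnd
    rw [List.flatMap_cons, List.filter_append, ih hnd'.2, List.filter_filter]
    by_cases hvc : v = c
    · subst hvc
      have : (if v ∈ t then D.filter (fun k => cnt k == v) else []) = [] := by
        simp [hnd'.1]
      rw [this, List.append_nil]
      simp only [List.mem_cons, true_or, if_pos]
      apply List.filter_congr
      intro k _; simp
    · have h0 : D.filter (fun a => cnt a == v && cnt a == c) = [] := by
        rw [List.filter_eq_nil_iff]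
        intro k _
        simp only [Bool.and_eq_true, beq_iff_eq]
        rintro ⟨h1, h2⟩; exact hvc (h1 ▸ h2 ▸ rfl)
      rw [h0, List.nil_append]
      simp [List.mem_cons, hvc]

-- ===== VERDICT helper: the main computation =====
theorem sort_popular_hashtags_py_spec : Claim_equal_sort_popular_hashtags_py := by
  unfold Claim_equal_sort_popular_hashtags_py
  intro hashtags _
  unfold Spec_sort_popular_hashtags_py sort_popular_hashtags_py sort_popular_hashtags_py_alt
  simp only []
  set cnt : String → Int := fun k => (hashtags.count k : Int) with hcnt
  set D : List String := PySem.Set.ofList hashtags with hD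
  -- A's loop facts
  obtain ⟨hk, hp, hg⟩ := aLoop_inv hashtags PySem.Dict.empty [] (by simp [PySem.Dict.keys_empty])
  rw [PySem.Set.update_nil_left] at hp
  have hAkeys : (hashtags.foldl
      (fun (st : PySem.Dict String Int × List String) hashtag =>
        if hashtag ∉ st.2 then (st.1.insert hashtag 1, st.2 ++ [hashtag])
        else (st.1.modify hashtag 0 (· + 1), st.2)) (PySem.Dict.empty, [])).1.keys = D := by
    rw [hk, hp, hD]
  have hAgetD : (fun k => (hashtags.foldl
      (fun (st : PySem.Dict String Int × List String) hashtag =>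
        if hashtag ∉ st.2 then (st.1.insert hashtag 1, st.2 ++ [hashtag])
        else (st.1.modify hashtag 0 (· + 1), st.2)) (PySem.Dict.empty, [])).1.getD k 0) = cnt := by
    funext k; rw [hg k, PySem.Dict.getD_empty]; simp [hcnt]
  rw [hAkeys, hAgetD]
  -- B's counts dict is the counter
  rw [PySem.Dict.foldl_insert_getD_add_one_eq_counter]
  -- B's buckets
  have hbfold : (PySem.Dict.counter hashtags).items.foldl
      (fun (d : PySem.Dict Int (List String)) p => d.modify p.2 [] (· ++ [p.1]))
      PySem.Dict.empty
      = ((PySem.Dict.counter hashtags).items.map (fun p => (p.2, p.1))).foldl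
        (fun (d : PySem.Dict Int (List String)) q => d.modify q.1 [] (· ++ [q.2]))
        PySem.Dict.empty := by
    rw [List.foldl_map]
  have hbgetD : ∀ c : Int, ((PySem.Dict.counter hashtags).items.foldl
      (fun (d : PySem.Dict Int (List String)) p => d.modify p.2 [] (· ++ [p.1]))
      PySem.Dict.empty).getD c [] = D.filter (fun k => cnt k == c) := by
    intro c
    rw [hbfold, PySem.Dict.getD_foldl_modify_append, PySem.Dict.getD_empty]
    rw [PySem.Dict.items_counter, hD, hcnt]
    simp only [List.map_map, List.filter_map, List.map_map, Function.comp_def]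
    simp
  have hbkeys : ((PySem.Dict.counter hashtags).items.foldl
      (fun (d : PySem.Dict Int (List String)) p => d.modify p.2 [] (· ++ [p.1]))
      PySem.Dict.empty).keys = PySem.Set.ofList (D.map cnt) := by
    have h := PySem.Dict.keys_foldl_modify_key (PySem.Dict.counter hashtags).items
      (fun p : String × Int => p.2) ([] : List String) (fun _ p => (· ++ [p.1])) PySem.Dict.empty
    rw [PySem.Dict.keys_empty, PySem.Set.update_nil_left] at h
    refine h.trans ?_
    rw [PySem.Dict.items_counter, List.map_map, hD, hcnt]
    simp [Function.comp_def]
  rw [hbkeys]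
  set ds : List Int := PySem.List.sorted (PySem.Set.ofList (D.map cnt)) (fun c => c) true with hds
  rw [PySem.List.foldl_append_eq_flatMap, List.nil_append]
  simp only [hbgetD]
  -- both sides are key-descending and have the same filter at every count value
  apply eq_of_pairwise_ge_of_filter_eq cnt
  · exact PySem.List.sorted_pairwise_rev D cnt
  · rw [List.pairwise_flatMap]
    constructor
    · intro c _
      apply List.pairwise_of_forall_mem_list
      intro a ha b hb
      have ha' := (List.mem_filter.mp ha).2
      have hb' := (List.mem_filter.mp hb).2
      simp only [beq_iff_eq] at ha' hb'
      omega
    · have := PySem.List.sorted_pairwise_rev (PySem.Set.ofList (D.map cnt)) (fun c => c)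
      rw [← hds] at this
      refine this.imp ?_
      intro c₁ c₂ hle x hx y hy
      have hx' := (List.mem_filter.mp hx).2
      have hy' := (List.mem_filter.mp hy).2
      simp only [beq_iff_eq] at hx' hy'
      omega
  · intro v
    rw [filter_sorted_rev]
    have hnd : ds.Nodup :=
      ((PySem.List.sorted_perm (PySem.Set.ofList (D.map cnt)) (fun c => c) true).nodup_iff).mpr
        (PySem.Set.nodup_ofList _)
    rw [filter_flatMap_buckets D cnt v ds hnd]
    by_cases hv : v ∈ ds
    · rw [if_pos hv]
    · rw [if_neg hv, List.filter_eq_nil_iff]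
      intro k hkD
      simp only [beq_iff_eq]
      intro hkv
      apply hv
      rw [hds, PySem.List.mem_sorted, PySem.Set.mem_ofList]
      exact List.mem_map.mpr ⟨k, hkD, hkv⟩
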